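-- pv_equiv track=rewrite | github.com/THUDM/slime | examples/if_rl/reward_ifrl.py | _normalize_kwargs
-- ===== SOURCE A (Python) =====
-- def _normalize_kwargs(raw_kwargs, n):
--     if isinstance(raw_kwargs, list):
--         items = [dict(x) if isinstance(x, dict) else {} for x in raw_kwargs]
--     elif isinstance(raw_kwargs, dict):
--         items = [dict(raw_kwargs) for _ in range(n)]
--     else:
--         items = [{} for _ in range(n)]
--
--     if len(items) < n:
--         items.extend({} for _ in range(n - len(items)))
--     elif len(items) > n:
--         items = items[:n]
--
--     return [{k: v for k, v in item.items() if v is not None} for item in items]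
-- ===== SOURCE B (Python) =====
-- def _normalize_kwargs(raw_kwargs, n):
--     out = []
--     for i in range(n):
--         if isinstance(raw_kwargs, list):
--             src = raw_kwargs[i] if i < len(raw_kwargs) and isinstance(raw_kwargs[i], dict) else {}
--         elif isinstance(raw_kwargs, dict):
--             src = raw_kwargs
--         else:
--             src = {}
--         out.append({k: v for k, v in src.items() if v is not None})
--     return out
-- ===== Notes on version B (the rewrite author's own statement) =====
-- stated objective: simpler
-- what changed: Replaces A's three-stage pipeline (build items, pad/truncate to n, filter each dict) with one loop over range(n) that picks the i-th source dict (or {}) and builds the cleaned dict inline, so no length-adjustment stage exists.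
-- intended difference: When raw_kwargs is a list, n < 0 and len(raw_kwargs) + n > 0, A's truncation items[:n] uses Python's negative-slice rule and returns the first len+n dicts, while B returns [] — the intended value, since n is a requested count and a negative count should yield no dicts. — e.g. on _normalize_kwargs(some [[("a", "1")], []], -1): A returns [[("a", "1")]], B returns []
import Mathlib
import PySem

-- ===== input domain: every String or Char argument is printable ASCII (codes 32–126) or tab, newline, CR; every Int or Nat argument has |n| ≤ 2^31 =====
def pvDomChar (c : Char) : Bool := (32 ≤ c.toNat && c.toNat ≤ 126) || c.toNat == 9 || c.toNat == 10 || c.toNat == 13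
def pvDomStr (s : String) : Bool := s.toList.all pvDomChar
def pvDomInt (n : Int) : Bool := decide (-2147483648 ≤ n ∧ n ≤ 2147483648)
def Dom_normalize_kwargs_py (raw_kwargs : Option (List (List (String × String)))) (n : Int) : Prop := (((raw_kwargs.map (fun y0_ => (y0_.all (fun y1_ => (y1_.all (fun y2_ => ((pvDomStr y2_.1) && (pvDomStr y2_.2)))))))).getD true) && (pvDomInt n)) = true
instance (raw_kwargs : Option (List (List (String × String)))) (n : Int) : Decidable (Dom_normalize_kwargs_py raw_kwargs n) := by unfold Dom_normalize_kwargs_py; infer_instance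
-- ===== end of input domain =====

-- B replaces A's three-stage pipeline (dispatch, pad/truncate, filter) with a single loop over
-- range(n) that chooses the i-th source dict and cleans it inline (objective: simpler).
-- Under the typed domain the dict values are strings, so the `v is not None` filter is vacuously
-- true; it is ported as a literal filter with a true predicate.

-- ===== PORT A =====
def normalize_kwargs_py (raw_kwargs : Option (List (List (String × String)))) (n : Int) : List (List (String × String)) :=
  -- items = [dict(x) if isinstance(x, dict) else {} for x in raw_kwargs] / [{} for _ in range(n)]
  -- (every element of the typed list is a dict, so dict(x) is a copy of x)
  let items : List (List (String × String)) :=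
    match raw_kwargs with
    | some l => l.map (fun x => x)
    | none   => (PySem.List.pyRange 0 n 1).map (fun _ => ([] : List (String × String)))
  let items :=
    if (items.length : Int) < n then
      items ++ (PySem.List.pyRange 0 (n - items.length) 1).map (fun _ => ([] : List (String × String)))
    else if n < (items.length : Int) then
      PySem.List.slice items none (some n)      -- items[:n]
    else items
  items.map (fun item => item.filter (fun _ => true))

-- ===== PORT B =====
def normalize_kwargs_py_alt (raw_kwargs : Option (List (List (String × String)))) (n : Int) : List (List (String × String)) :=
  (PySem.List.pyRange 0 n 1).foldl (fun out i =>
    let src : List (String × String) :=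
      match raw_kwargs with
      | some l => if i < (l.length : Int) then PySem.List.pyGetD l i [] else []
      | none   => []
    out ++ [src.filter (fun _ => true)]) []

-- ===== PRECONDITION & SPEC =====
-- When raw_kwargs is a list, n < 0 and len(raw_kwargs) + n > 0, A's truncation items[:n] uses
-- Python's negative-slice rule and returns the first len+n dicts, while B returns [] — the
-- intended value, since n is a requested count and a negative count should yield no dicts.
def D_normalize_kwargs_py (raw_kwargs : Option (List (List (String × String)))) (n : Int) : Prop :=
  n < 0 ∧ 0 < ((raw_kwargs.getD []).length : Int) + n
instance (raw_kwargs : Option (List (List (String × String)))) (n : Int) : Decidable (D_normalize_kwargs_py raw_kwargs n) := by unfold D_normalize_kwargs_py; infer_instance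

def Spec_normalize_kwargs_py (raw_kwargs : Option (List (List (String × String)))) (n : Int) (out : List (List (String × String))) : Prop := ¬ D_normalize_kwargs_py raw_kwargs n → out = normalize_kwargs_py_alt raw_kwargs n
instance (raw_kwargs : Option (List (List (String × String)))) (n : Int) (out : List (List (String × String))) : Decidable (Spec_normalize_kwargs_py raw_kwargs n out) := by unfold Spec_normalize_kwargs_py; infer_instance

def pvDiffWitness_normalize_kwargs_py : (Option (List (List (String × String)))) × Int :=
  (some [[("a", "1")], []], -1)
def pvDiffWitnessOut_normalize_kwargs_py : (List (List (String × String))) × (List (List (String × String))) :=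
  ([[("a", "1")]], [])

-- ===== CLAIM (what is proved, stated in full; the proofs are below) =====
def Claim_unchanged_normalize_kwargs_py : Prop := ∀ (raw_kwargs : Option (List (List (String × String)))) (n : Int), Dom_normalize_kwargs_py raw_kwargs n → Spec_normalize_kwargs_py raw_kwargs n (normalize_kwargs_py raw_kwargs n)
def Claim_changed_normalize_kwargs_py : Prop := Dom_normalize_kwargs_py (pvDiffWitness_normalize_kwargs_py.1) (pvDiffWitness_normalize_kwargs_py.2) ∧ D_normalize_kwargs_py (pvDiffWitness_normalize_kwargs_py.1) (pvDiffWitness_normalize_kwargs_py.2) ∧ normalize_kwargs_py (pvDiffWitness_normalize_kwargs_py.1) (pvDiffWitness_normalize_kwargs_py.2) = pvDiffWitnessOut_normalize_kwargs_py.1 ∧ normalize_kwargs_py_alt (pvDiffWitness_normalize_kwargs_py.1) (pvDiffWitness_normalize_kwargs_py.2) = pvDiffWitnessOut_normalize_kwargs_py.2 ∧ pvDiffWitnessOut_normalize_kwargs_py.1 ≠ pvDiffWitnessOut_normalize_kwargs_py.2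
def Claim_exact_normalize_kwargs_py : Prop := ∀ (raw_kwargs : Option (List (List (String × String)))) (n : Int), Dom_normalize_kwargs_py raw_kwargs n → D_normalize_kwargs_py raw_kwargs n → normalize_kwargs_py raw_kwargs n ≠ normalize_kwargs_py_alt raw_kwargs n

-- ===== LEMMAS AND PROOFS =====

-- B's loop, written as a map over List.range.
theorem alt_none (n : Int) :
    normalize_kwargs_py_alt none n
      = (List.range n.toNat).map (fun _ => ([] : List (String × String))) := by
  simp only [normalize_kwargs_py_alt]
  rw [PySem.List.foldl_append_singleton_eq_map, PySem.List.pyRange_one, List.map_map,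
    List.nil_append]
  apply List.ext_getElem
  · simp only [List.length_map, List.length_range]
    omega
  · intro i hi1 hi2
    simp [Function.comp]

theorem alt_some (l : List (List (String × String))) (n : Int) :
    normalize_kwargs_py_alt (some l) n
      = (List.range n.toNat).map (fun k => if k < l.length then l.getD k [] else []) := by
  simp only [normalize_kwargs_py_alt]
  rw [PySem.List.foldl_append_singleton_eq_map, PySem.List.pyRange_one, List.map_map,
    List.nil_append]
  simp only [Int.sub_zero]
  apply List.map_congr_left
  intro k _
  simp [PySem.List.pyGetD_natCast]

-- indexed selection over a range = take-and-pad
theorem range_sel_eq_take_pad {α : Type} (l : List α) (d : α) (m : Nat) :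
    (List.range m).map (fun k => if k < l.length then l.getD k d else d) =
      l.take m ++ List.replicate (m - l.length) d := by
  induction l generalizing m with
  | nil => simp
  | cons x xs ih =>
    cases m with
    | zero => simp
    | succ m =>
      rw [List.range_succ_eq_map, List.map_cons, List.map_map]
      have h1 : ((fun k => if k < (x :: xs).length then (x :: xs).getD k d else d) ∘ Nat.succ)
          = fun k => if k < xs.length then xs.getD k d else d := by
        funext k
        simp
      rw [h1, ih]
      simp

theorem main_unchanged :
    ∀ (raw_kwargs : Option (List (List (String × String)))) (n : Int),
      ¬ D_normalize_kwargs_py raw_kwargs n →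
      normalize_kwargs_py raw_kwargs n = normalize_kwargs_py_alt raw_kwargs n := by
  intro rk n hD
  unfold D_normalize_kwargs_py at hD
  cases rk with
  | none =>
    rw [alt_none]
    simp only [normalize_kwargs_py, List.length_map, PySem.List.length_pyRange_one, Int.sub_zero]
    split_ifs with h1 h2
    · omega
    · rw [show n.toNat = 0 from by omega]
      rw [PySem.List.pyRange_one_eq_nil (by omega : n ≤ 0), List.map_nil,
        show n = -(((-n).toNat : Nat) : Int) from by omega,
        PySem.List.slice_to_neg_natCast _ _ (by omega)]
      simp
    · rw [PySem.List.pyRange_one]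
      apply List.ext_getElem
      · simp only [List.length_map, List.length_range]
        omega
      · intro i hi1 hi2
        simp [Function.comp]
  | some l =>
    simp only [Option.getD_some] at hD
    have hid : l.map (fun x : List (String × String) => x) = l := by simp
    rw [alt_some, range_sel_eq_take_pad]
    simp only [normalize_kwargs_py, hid]
    split_ifs with h1 h2
    · -- pad: l.length < n
      rw [List.map_append, List.take_of_length_le (by omega)]
      congr 1
      · simp
      · rw [PySem.List.pyRange_one, List.map_map, List.map_map]
        apply List.ext_getElem
        · simp only [List.length_map, List.length_range, List.length_replicate]
          omega
        · intro i hi1 hi2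
          simp [Function.comp]
    · -- truncate: n < l.length
      by_cases hn : 0 ≤ n
      · rw [PySem.List.slice_to _ hn]
        simp [show n.toNat - l.length = 0 from by omega]
      · rw [show n.toNat = 0 from by omega]
        rw [show n = -(((-n).toNat : Nat) : Int) from by omega,
          PySem.List.slice_to_neg_natCast _ _ (by omega)]
        simp [show l.length - (-n).toNat = 0 from by omega]
    · -- exact length
      rw [show n.toNat = l.length from by omega]
      simp

-- ===== VERDICT (by name: the statement is the Claim_ definition above) =====
theorem normalize_kwargs_py_spec : Claim_unchanged_normalize_kwargs_py := by
  intro rk n _ hD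
  exact main_unchanged rk n hD

theorem normalize_kwargs_py_changed : Claim_changed_normalize_kwargs_py := by
  unfold Claim_changed_normalize_kwargs_py; decide

theorem normalize_kwargs_py_tight : Claim_exact_normalize_kwargs_py := by
  intro rk n _ hD
  unfold D_normalize_kwargs_py at hD
  cases rk with
  | none =>
    simp only [Option.getD_none, List.length_nil] at hD
    omega
  | some l =>
    simp only [Option.getD_some] at hD
    obtain ⟨hn, hlen⟩ := hD
    intro heq
    have hid : l.map (fun x : List (String × String) => x) = l := by simp
    have hB : normalize_kwargs_py_alt (some l) n = [] := by
      rw [alt_some, show n.toNat = 0 from by omega]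
      simp
    have hAeq : normalize_kwargs_py (some l) n
        = (List.take (l.length - (-n).toNat) l).map (fun item => item.filter (fun _ => true)) := by
      simp only [normalize_kwargs_py, hid]
      set k := (-n).toNat with hkdef
      rw [if_neg (by omega), if_pos (by omega),
        show n = -((k : Nat) : Int) from by omega,
        PySem.List.slice_to_neg_natCast _ _ (by omega)]
    rw [hB, hAeq] at heq
    have hlenz := congrArg List.length heq
    simp only [List.length_map, List.length_take, List.length_nil] at hlenz
    omega
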